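-- pv_equiv track=rewrite | github.com/tagore8661/accenture-coding-practice | Problem-26.py | sum_diff
-- ===== SOURCE A (Python) =====
-- def sum_diff(arr):
--     even_arr = 0
--     odd_arr = 0
--     for i in range(len(arr)):
--         if i % 2 == 0 :
--             even_arr ^= arr[i]
--         else:
--             odd_arr += arr[i]
--     return  odd_arr - even_arr
-- ===== SOURCE B (Python) =====
-- def sum_diff(arr):
--     # Divide and conquer: solve(a) returns (xor of even-index items, sum of
--     # odd-index items) of a.  Split at an even index m so the right half's
--     # index parities are preserved, then combine with (xl ^ xr, sl + sr).
--     def solve(a):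
--         n = len(a)
--         if n == 0:
--             return (0, 0)
--         if n == 1:
--             return (a[0], 0)
--         if n == 2:
--             return (a[0], a[1])
--         m = (n // 2 + 1) // 2 * 2  # even split point, 2 <= m <= n-1
--         xl, sl = solve(a[:m])
--         xr, sr = solve(a[m:])
--         return (xl ^ xr, sl + sr)
--
--     x, s = solve(arr)
--     return s - x
-- ===== Notes on version B (the rewrite author's own statement) =====
-- stated objective: alternative
-- what changed: Replaces A's single indexed loop with an i%2 branch by a divide-and-conquer recursion: split the list at an even index (preserving index parity in the right half), solve both halves for (xor of even-index, sum of odd-index), and combine with (xl^xr, sl+sr).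
import Mathlib
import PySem

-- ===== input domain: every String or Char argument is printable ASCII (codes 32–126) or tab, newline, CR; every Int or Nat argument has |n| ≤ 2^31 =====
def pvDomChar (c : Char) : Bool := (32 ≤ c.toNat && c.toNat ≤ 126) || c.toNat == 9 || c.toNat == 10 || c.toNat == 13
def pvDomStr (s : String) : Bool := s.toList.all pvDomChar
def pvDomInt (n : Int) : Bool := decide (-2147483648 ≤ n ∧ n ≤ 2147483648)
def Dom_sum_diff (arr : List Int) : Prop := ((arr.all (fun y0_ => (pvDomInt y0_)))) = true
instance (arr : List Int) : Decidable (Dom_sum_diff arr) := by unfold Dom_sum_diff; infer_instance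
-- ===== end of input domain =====

-- B replaces A's single indexed loop (i%2 branch) by a divide-and-conquer recursion that
-- splits the list at an even index and combines the two halves' (xor-even, sum-odd) pairs.

-- ===== PORT A =====
-- single loop over range(len(arr)), pair state (even_arr, odd_arr)
def sum_diff (arr : List Int) : Int :=
  let s := (PySem.List.pyRange 0 (PySem.List.len arr) 1).foldl
    (fun (p : Int × Int) i =>
      if PySem.Int.mod i 2 = 0 then
        (PySem.Int.bxor p.1 (PySem.List.pyGetD arr i 0), p.2)   -- indices from range(len) are in range
      else
        (p.1, p.2 + PySem.List.pyGetD arr i 0))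
    (0, 0)
  s.2 - s.1

-- ===== PORT B =====
-- Source B's solve(a): (xor of even-index items, sum of odd-index items), by splitting at the
-- even index m = (n//2+1)//2*2 (a[:m] → List.take, a[m:] → List.drop) and combining.
-- The extra Nat argument is only a structural-recursion fuel guard (length fuel suffices,
-- each recursive call strictly shortens the list); it is never hit on the starting fuel.
def pvSolve : Nat → List Int → Int × Int
  | _, [] => (0, 0)
  | _, [x] => (x, 0)
  | _, [x, y] => (x, y)
  | 0, _ => (0, 0)   -- unreachable fuel guard
  | f + 1, x :: y :: z :: r =>
    let l := x :: y :: z :: r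
    let m := (l.length / 2 + 1) / 2 * 2
    let pl := pvSolve f (l.take m)
    let pr := pvSolve f (l.drop m)
    (PySem.Int.bxor pl.1 pr.1, pl.2 + pr.2)

def sum_diff_alt (arr : List Int) : Int :=
  (pvSolve arr.length arr).2 - (pvSolve arr.length arr).1

-- ===== PRECONDITION & SPEC =====
def Spec_sum_diff (arr : List Int) (out : Int) : Prop := out = sum_diff_alt arr
instance (arr : List Int) (out : Int) : Decidable (Spec_sum_diff arr out) := by unfold Spec_sum_diff; infer_instance

-- ===== CLAIM (what is proved, stated in full; the proofs are below) =====
def Claim_equal_sum_diff : Prop := ∀ (arr : List Int), Dom_sum_diff arr → Spec_sum_diff arr (sum_diff arr)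

-- ===== LEMMAS AND PROOFS =====

-- proof-only reference function: the stride-2 subsequence (elements 0, 2, 4, …)
def pvStride2 : List Int → List Int
  | [] => []
  | [x] => [x]
  | x :: _ :: r => x :: pvStride2 r

-- sign/magnitude view of PySem.Int.bxor, used to prove associativity
def pvMag (a : Int) : Nat := (if 0 ≤ a then a else -a - 1).toNat
def pvDec (s : Bool) (n : Nat) : Int := if s then -(n : Int) - 1 else (n : Int)

theorem pvBxor_view (a b : Int) :
    PySem.Int.bxor a b = pvDec ((!decide (0 ≤ a)) ^^ (!decide (0 ≤ b))) (pvMag a ^^^ pvMag b) := by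
  by_cases ha : 0 ≤ a <;> by_cases hb : 0 ≤ b <;>
    simp [PySem.Int.bxor, pvDec, pvMag, ha, hb]

theorem pvMag_dec (s : Bool) (n : Nat) : pvMag (pvDec s n) = n := by
  cases s <;> simp [pvMag, pvDec] <;> try omega

theorem pvSign_dec (s : Bool) (n : Nat) : (!decide (0 ≤ pvDec s n)) = s := by
  cases s <;> simp [pvDec] <;> try omega

theorem pvBxor_assoc (a b c : Int) :
    PySem.Int.bxor (PySem.Int.bxor a b) c = PySem.Int.bxor a (PySem.Int.bxor b c) := by
  rw [pvBxor_view a b, pvBxor_view b c, pvBxor_view (pvDec _ _) c, pvBxor_view a (pvDec _ _),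
    pvMag_dec, pvMag_dec, pvSign_dec, pvSign_dec, Bool.xor_assoc, Nat.xor_assoc]

theorem pvBxor_zero_left (a : Int) : PySem.Int.bxor 0 a = a := by
  rw [PySem.Int.bxor_comm]; exact PySem.Int.bxor_zero a

theorem foldl_bxor_shift (l : List Int) (a : Int) :
    l.foldl PySem.Int.bxor a = PySem.Int.bxor a (l.foldl PySem.Int.bxor 0) := by
  induction l generalizing a with
  | nil => simp [PySem.Int.bxor_zero]
  | cons x l ih =>
      simp only [List.foldl_cons]
      rw [ih (PySem.Int.bxor a x), ih (PySem.Int.bxor 0 x), pvBxor_zero_left, pvBxor_assoc]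

theorem pvStride2_cons_tail (x : Int) (b : List Int) :
    pvStride2 (x :: b) = x :: pvStride2 b.tail := by
  cases b <;> simp [pvStride2]

theorem pvStride2_append (a : List Int) :
    ∀ b, pvStride2 (a ++ b)
      = pvStride2 a ++ pvStride2 (if a.length % 2 = 0 then b else b.tail) := by
  induction a using pvStride2.induct with
  | case1 => intro b; simp [pvStride2]
  | case2 x => intro b; simpa [pvStride2] using pvStride2_cons_tail x b
  | case3 x y r ih =>
      intro b
      simp only [List.cons_append, pvStride2, ih, List.length_cons]
      by_cases h : r.length % 2 = 0
      · rw [if_pos h, if_pos (show (r.length + 1 + 1) % 2 = 0 by omega)]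
      · rw [if_neg h, if_neg (show ¬ (r.length + 1 + 1) % 2 = 0 by omega)]

-- pvSolve computes exactly (xor of stride2, sum of stride2 of the tail) given enough fuel
theorem pvSolve_eq (f : Nat) :
    ∀ l : List Int, l.length ≤ f →
      pvSolve f l = ((pvStride2 l).foldl PySem.Int.bxor 0, (pvStride2 l.tail).sum) := by
  induction f with
  | zero =>
      intro l hf
      have : l = [] := List.eq_nil_of_length_eq_zero (Nat.le_zero.mp hf)
      subst this; simp [pvSolve, pvStride2]
  | succ f ih =>
      intro l hf
      match l with
      | [] => simp [pvSolve, pvStride2]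
      | [x] => simp [pvSolve, pvStride2, pvBxor_zero_left]
      | [x, y] => simp [pvSolve, pvStride2, pvBxor_zero_left]
      | x :: y :: z :: r =>
        rw [pvSolve]
        set lv := x :: y :: z :: r with hlv
        set mv := (lv.length / 2 + 1) / 2 * 2 with hmv
        have hlen : lv.length = r.length + 3 := by simp [hlv]
        have hm2 : 2 ≤ mv := by simp only [hmv]; omega
        have hmn : mv ≤ lv.length := by simp only [hmv]; omega
        have hfl : (lv.take mv).length ≤ f := by
          rw [List.length_take]; simp only [hlv] at hf ⊢; simp at hf ⊢; omega
        have hfr : (lv.drop mv).length ≤ f := by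
          rw [List.length_drop]; simp only [hlv] at hf ⊢; simp at hf ⊢; omega
        rw [ih _ hfl, ih _ hfr]
        dsimp only
        have hsplit : lv = lv.take mv ++ lv.drop mv := (List.take_append_drop mv lv).symm
        have htlen : (lv.take mv).length = mv := by
          rw [List.length_take]; omega
        have hc : (lv.take mv).length % 2 = 0 := by
          rw [htlen]; simp only [hmv]; omega
        have hne : lv.take mv ≠ [] := by
          intro h; rw [h] at htlen; simp at htlen; omega
        refine Prod.ext ?_ ?_
        · show PySem.Int.bxor _ _ = List.foldl PySem.Int.bxor 0 (pvStride2 lv)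
          conv_rhs => rw [hsplit]
          rw [pvStride2_append, if_pos hc, List.foldl_append]
          exact (foldl_bxor_shift _ _).symm
        · show _ + _ = (pvStride2 lv.tail).sum
          conv_rhs => rw [hsplit, List.tail_append_of_ne_nil hne]
          have hc2 : ¬ (lv.take mv).tail.length % 2 = 0 := by
            rw [List.length_tail, htlen]; omega
          rw [pvStride2_append, if_neg hc2, List.sum_append]

-- A's loop invariant: after n steps the state is (xor of stride2 of take n, sum of stride2 of its tail)
theorem pvStride2_append_singleton (l : List Int) (x : Int) :
    pvStride2 (l ++ [x]) = if l.length % 2 = 0 then pvStride2 l ++ [x] else pvStride2 l := by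
  induction l using pvStride2.induct with
  | case1 => simp [pvStride2]
  | case2 y => simp [pvStride2]
  | case3 y z r ih =>
      simp only [List.cons_append, pvStride2, ih, List.length_cons]
      by_cases h : r.length % 2 = 0
      · rw [if_pos h, if_pos (by omega)]
      · rw [if_neg h, if_neg (by omega)]

theorem sum_diff_loop_invariant (arr : List Int) (n : Nat) (hn : n ≤ arr.length) :
    (PySem.List.pyRange 0 (n : Int) 1).foldl
      (fun (p : Int × Int) i =>
        if PySem.Int.mod i 2 = 0 then
          (PySem.Int.bxor p.1 (PySem.List.pyGetD arr i 0), p.2)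
        else
          (p.1, p.2 + PySem.List.pyGetD arr i 0))
      (0, 0)
    = ((pvStride2 (arr.take n)).foldl PySem.Int.bxor 0, (pvStride2 (arr.take n).tail).sum) := by
  induction n with
  | zero => simp [pvStride2]
  | succ m ih =>
      have hm : m ≤ arr.length := Nat.le_of_succ_le hn
      have hlt : m < arr.length := hn
      have hcast : ((m + 1 : Nat) : Int) = (m : Int) + 1 := by push_cast; ring
      rw [hcast, PySem.List.pyRange_one_succ_right (by positivity), List.foldl_append, ih hm]
      have hget : PySem.List.pyGetD arr (m : Int) 0 = arr[m] := by
        simp [PySem.List.pyGetD_natCast, hlt]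
      have htake : arr.take (m + 1) = arr.take m ++ [arr[m]] := by
        rw [List.take_add_one]; simp [List.getElem?_eq_getElem hlt]
      have hlen : (arr.take m).length = m := List.length_take_of_le hm
      have hmod : PySem.Int.mod (m : Int) 2 = ((m % 2 : Nat) : Int) := by
        exact_mod_cast PySem.Int.mod_natCast m 2
      rcases Nat.even_or_odd m with he | ho
      · -- even index: xor branch; the odd-index part (stride of the tail) is unchanged
        have h2 : m % 2 = 0 := Nat.even_iff.mp he
        simp only [List.foldl_cons, List.foldl_nil, hmod, h2, Nat.cast_zero, hget,
          htake]
        rcases m with _ | k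
        · simp [pvStride2]
        · have hne : arr.take (k + 1) ≠ [] := by
            intro h; have := congrArg List.length h; simp [hlen] at this
          rw [List.tail_append_of_ne_nil hne, pvStride2_append_singleton,
            pvStride2_append_singleton]
          have c2 : k % 2 ≠ 0 := by omega
          simp [List.length_tail, hlen, h2, c2, List.foldl_append]
      · -- odd index: sum branch; the even-index stride is unchanged
        have h2 : m % 2 = 1 := Nat.odd_iff.mp ho
        have hne : arr.take m ≠ [] := by
          intro h; have := congrArg List.length h; simp [hlen] at this; omega
        simp only [List.foldl_cons, List.foldl_nil, hmod, h2, Nat.cast_one,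
          if_neg (one_ne_zero : (1 : Int) ≠ 0), hget, htake]
        rw [List.tail_append_of_ne_nil hne, pvStride2_append_singleton,
          pvStride2_append_singleton]
        have c2 : (m - 1) % 2 = 0 := by omega
        simp [List.length_tail, hlen, h2, c2, List.sum_append]

-- ===== VERDICT (by name: the statement is the Claim_ definition above) =====
theorem sum_diff_spec : Claim_equal_sum_diff := by
  intro arr _
  unfold Spec_sum_diff sum_diff sum_diff_alt
  have h := sum_diff_loop_invariant arr arr.length le_rfl
  simp only [PySem.List.len_eq] at *
  rw [h, pvSolve_eq arr.length arr le_rfl]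
  simp
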